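-- pv_equiv track=rewrite | github.com/liguowang/CrossMap | build/lib/cmmodule/bam_cigar.py | fetch_deletion
-- ===== SOURCE A (Python) =====
-- def fetch_deletion(chrom, st, cigar):
-- 	''' fetch deletion regions defined by cigar. st must be zero based
-- 	return list of tuple of (chrom,st, end)
-- 	'''
-- 	#match = re.compile(r'(\d+)(\D)')
-- 	chrom_st = st
-- 	del_bound =[]
-- 	for c,s in cigar:	#code and size
-- 		if c==0:		#match
-- 			chrom_st += s
-- 		elif c==1:		#insertion to ref
-- 			continue
-- 		elif c==2:		#deletion to ref
-- 			del_bound.append((chrom, chrom_st, chrom_st + s))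
-- 			chrom_st += s
-- 		elif c==3:		#gap or intron
-- 			chrom_st += s
-- 		elif c==4:		#soft clipping. We do NOT include soft clip as part of exon
-- 			chrom_st += s
-- 		else:
-- 			continue
-- 	return del_bound
-- ===== SOURCE B (Python) =====
-- def fetch_deletion(chrom, st, cigar):
--     ''' fetch deletion regions defined by cigar. st must be zero based
--     return list of tuple of (chrom,st, end)
--     '''
--     # pass 1: prefix table of start positions (starts[i] = position before op i)
--     starts = [st]
--     last = st
--     for c, s in cigar:
--         last += s if c in (0, 2, 3, 4) else 0
--         starts.append(last)
--     # pass 2: select deletion ops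
--     return [(chrom, p, p + s) for (c, s), p in zip(cigar, starts) if c == 2]
-- ===== Notes on version B (the rewrite author's own statement) =====
-- stated objective: alternative
-- what changed: Replaces the single stateful branch-per-opcode scan by a prefix-position table (one accumulation pass) followed by a zip/comprehension filtering pass that emits the deletion intervals.
import Mathlib
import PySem

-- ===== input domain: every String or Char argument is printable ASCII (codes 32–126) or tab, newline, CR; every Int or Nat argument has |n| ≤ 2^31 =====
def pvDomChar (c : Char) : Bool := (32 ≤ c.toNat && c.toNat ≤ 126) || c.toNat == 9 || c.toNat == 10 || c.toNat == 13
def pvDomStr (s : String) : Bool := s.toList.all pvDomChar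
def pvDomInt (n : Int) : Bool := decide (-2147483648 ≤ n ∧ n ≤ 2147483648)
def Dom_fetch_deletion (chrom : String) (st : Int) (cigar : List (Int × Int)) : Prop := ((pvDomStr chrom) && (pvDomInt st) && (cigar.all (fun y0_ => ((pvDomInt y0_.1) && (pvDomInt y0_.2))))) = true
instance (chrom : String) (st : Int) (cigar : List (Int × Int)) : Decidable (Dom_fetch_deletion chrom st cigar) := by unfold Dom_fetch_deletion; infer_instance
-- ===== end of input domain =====

-- ===== PORT A =====
def fetch_deletion (chrom : String) (st : Int) (cigar : List (Int × Int)) : List (String × Int × Int) :=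
  (cigar.foldl (fun (acc : Int × List (String × Int × Int)) cs =>
      if cs.1 = 0 then (acc.1 + cs.2, acc.2)
      else if cs.1 = 1 then acc
      else if cs.1 = 2 then (acc.1 + cs.2, acc.2 ++ [(chrom, acc.1, acc.1 + cs.2)])
      else if cs.1 = 3 then (acc.1 + cs.2, acc.2)
      else if cs.1 = 4 then (acc.1 + cs.2, acc.2)
      else acc) (st, [])).2

-- B: builds a prefix table of start positions, then filters deletion ops; return value only, no mutation.
-- ===== PORT B =====
-- advance of one op toward the reference position (s for codes 0,2,3,4, else 0)
def pvAdv (cs : Int × Int) : Int :=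
  if cs.1 = 0 ∨ cs.1 = 2 ∨ cs.1 = 3 ∨ cs.1 = 4 then cs.2 else 0

def fetch_deletion_alt (chrom : String) (st : Int) (cigar : List (Int × Int)) : List (String × Int × Int) :=
  let p := cigar.foldl (fun (acc : List Int × Int) cs =>
      (acc.1 ++ [acc.2 + pvAdv cs], acc.2 + pvAdv cs)) ([st], st)
  (cigar.zip p.1).filterMap (fun x =>
    if x.1.1 = 2 then some (chrom, x.2, x.2 + x.1.2) else none)

-- ===== PRECONDITION & SPEC =====
def Spec_fetch_deletion (chrom : String) (st : Int) (cigar : List (Int × Int)) (out : List (String × Int × Int)) : Prop := out = fetch_deletion_alt chrom st cigar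
instance (chrom : String) (st : Int) (cigar : List (Int × Int)) (out : List (String × Int × Int)) : Decidable (Spec_fetch_deletion chrom st cigar out) := by unfold Spec_fetch_deletion; infer_instance

-- ===== CLAIM (what is proved, stated in full; the proofs are below) =====
def Claim_equal_fetch_deletion : Prop := ∀ (chrom : String) (st : Int) (cigar : List (Int × Int)), Dom_fetch_deletion chrom st cigar → Spec_fetch_deletion chrom st cigar (fetch_deletion chrom st cigar)

-- ===== LEMMAS AND PROOFS =====

-- reference recursion: deletion intervals starting from position st
def pvDels (chrom : String) (st : Int) : List (Int × Int) → List (String × Int × Int)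
  | [] => []
  | cs :: r =>
      if cs.1 = 2 then (chrom, st, st + cs.2) :: pvDels chrom (st + pvAdv cs) r
      else pvDels chrom (st + pvAdv cs) r

-- tail of the prefix-position table starting after position st
def pvScan (st : Int) : List (Int × Int) → List Int
  | [] => []
  | cs :: r => (st + pvAdv cs) :: pvScan (st + pvAdv cs) r

theorem foldlA_eq (chrom : String) :
    ∀ (cigar : List (Int × Int)) (st : Int) (acc : List (String × Int × Int)),
    (cigar.foldl (fun (acc : Int × List (String × Int × Int)) cs =>
      if cs.1 = 0 then (acc.1 + cs.2, acc.2)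
      else if cs.1 = 1 then acc
      else if cs.1 = 2 then (acc.1 + cs.2, acc.2 ++ [(chrom, acc.1, acc.1 + cs.2)])
      else if cs.1 = 3 then (acc.1 + cs.2, acc.2)
      else if cs.1 = 4 then (acc.1 + cs.2, acc.2)
      else acc) (st, acc)).2 = acc ++ pvDels chrom st cigar := by
  intro cigar
  induction cigar with
  | nil => intro st acc; simp [pvDels]
  | cons cs r ih =>
    intro st acc
    simp only [List.foldl_cons, pvDels, pvAdv]
    split_ifs with h0 h1 h2 h3 h4 <;>
      simp_all

theorem foldlB_eq :
    ∀ (cigar : List (Int × Int)) (st : Int) (pre : List Int),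
    (cigar.foldl (fun (acc : List Int × Int) cs =>
      (acc.1 ++ [acc.2 + pvAdv cs], acc.2 + pvAdv cs)) (pre ++ [st], st)).1
    = pre ++ st :: pvScan st cigar := by
  intro cigar
  induction cigar with
  | nil => intro st pre; simp [pvScan]
  | cons cs r ih =>
    intro st pre
    simp only [List.foldl_cons, pvScan]
    have := ih (st + pvAdv cs) (pre ++ [st])
    simpa using this

theorem zip_filterMap_eq (chrom : String) :
    ∀ (cigar : List (Int × Int)) (st : Int),
    ((cigar.zip (st :: pvScan st cigar)).filterMap (fun x =>
      if x.1.1 = 2 then some (chrom, x.2, x.2 + x.1.2) else none))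
    = pvDels chrom st cigar := by
  intro cigar
  induction cigar with
  | nil => intro st; simp [pvDels]
  | cons cs r ih =>
    intro st
    simp only [pvScan, List.zip_cons_cons, List.filterMap_cons, pvDels]
    by_cases h : cs.1 = 2 <;> simp [h, ih]

-- ===== VERDICT (by name: the statement is the Claim_ definition above) =====
theorem fetch_deletion_spec : Claim_equal_fetch_deletion := by
  intro chrom st cigar _
  unfold Spec_fetch_deletion fetch_deletion fetch_deletion_alt
  have hA := foldlA_eq chrom cigar st []
  have hB := foldlB_eq cigar st []
  simp only [List.nil_append] at hA hB
  simp only [hA, hB, zip_filterMap_eq]
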